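-- pv_equiv track=rewrite | github.com/pyther-hub/ml4sci-taylor-series-task | metrics.py | _parse_one
-- ===== SOURCE A (Python) =====
-- from typing import Dict, List
--
-- _BINARY_OPS = frozenset({"+", "-", "*", "/", "**"})
--
-- _UNARY_OPS  = frozenset({
--     "sin", "cos", "tan", "exp", "log", "sqrt",
--     "asin", "acos", "atan", "sinh", "cosh", "tanh",
--     "asinh", "acosh", "atanh",
-- })
--
-- _LEAF_SYMS  = frozenset({"x", "a", "pi", "E", "oo", "-oo"})
--
-- _DIGITS     = frozenset({"0", "1", "2", "3", "4", "5", "6", "7", "8", "9"})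
--
-- _SIGN_TOKS  = frozenset({"+", "-"})
--
-- def _parse_one(tokens: List[str], pos: int) -> int:
--     """Consume exactly one prefix expression from *tokens* starting at *pos*.
--
--     Numbers are represented as a sign token ('+' or '-') followed by one or
--     more digit tokens — consecutive digits are combined into a single integer,
--     matching the encoding used in dataset-generation.py.
--
--     Returns the position immediately after the consumed expression.
--     Raises ``ValueError`` if the stream is malformed or exhausted.
--     """
--     if pos >= len(tokens):
--         raise ValueError("Unexpected end of token stream")
--
--     tok = tokens[pos]
--
--     # ── Number: sign token followed by one-or-more digit tokens ──────────────
--     # Digits are individual vocab tokens ('0'..'9'); combine them into one int.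
--     if tok in _SIGN_TOKS and pos + 1 < len(tokens) and tokens[pos + 1] in _DIGITS:
--         pos += 2  # skip sign and first digit
--         while pos < len(tokens) and tokens[pos] in _DIGITS:
--             pos += 1   # consume additional digit tokens (multi-digit numbers)
--         return pos
--
--     # ── Leaf symbols ──────────────────────────────────────────────────────────
--     if tok in _LEAF_SYMS:
--         return pos + 1
--
--     # ── Binary operators ──────────────────────────────────────────────────────
--     if tok in _BINARY_OPS:
--         pos = _parse_one(tokens, pos + 1)   # left operand
--         pos = _parse_one(tokens, pos)        # right operand
--         return pos
--
--     # ── Unary functions ───────────────────────────────────────────────────────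
--     if tok in _UNARY_OPS:
--         return _parse_one(tokens, pos + 1)
--
--     raise ValueError(f"Unexpected token {tok!r} at position {pos}")
-- ===== SOURCE B (Python) =====
-- from typing import List
--
-- _BINARY_OPS = frozenset({"+", "-", "*", "/", "**"})
--
-- _UNARY_OPS  = frozenset({
--     "sin", "cos", "tan", "exp", "log", "sqrt",
--     "asin", "acos", "atan", "sinh", "cosh", "tanh",
--     "asinh", "acosh", "atanh",
-- })
--
-- _LEAF_SYMS  = frozenset({"x", "a", "pi", "E", "oo", "-oo"})
--
-- _DIGITS     = frozenset({"0", "1", "2", "3", "4", "5", "6", "7", "8", "9"})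
--
-- _SIGN_TOKS  = frozenset({"+", "-"})
--
-- def _parse_one(tokens: List[str], pos: int) -> int:
--     """Iterative single pass: count still-needed operands instead of recursing."""
--     needed = 1
--     while needed:
--         if pos >= len(tokens):
--             raise ValueError("Unexpected end of token stream")
--         tok = tokens[pos]
--         if tok in _SIGN_TOKS and pos + 1 < len(tokens) and tokens[pos + 1] in _DIGITS:
--             pos += 2
--             while pos < len(tokens) and tokens[pos] in _DIGITS:
--                 pos += 1
--             needed -= 1
--         elif tok in _LEAF_SYMS:
--             pos += 1
--             needed -= 1
--         elif tok in _BINARY_OPS: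
--             pos += 1
--             needed += 1
--         elif tok in _UNARY_OPS:
--             pos += 1
--         else:
--             raise ValueError(f"Unexpected token {tok!r} at position {pos}")
--     return pos
-- ===== Notes on version B (the rewrite author's own statement) =====
-- stated objective: alternative
-- what changed: A's recursive-descent parser (one recursive call per operand, recursion as deep as the expression) is replaced by a single iterative scan that keeps a count of still-needed operands (needed += arity - 1 per token), returning pos when the count reaches zero; classification order and the sign-then-digits lookahead are kept identical.
import Mathlib
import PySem

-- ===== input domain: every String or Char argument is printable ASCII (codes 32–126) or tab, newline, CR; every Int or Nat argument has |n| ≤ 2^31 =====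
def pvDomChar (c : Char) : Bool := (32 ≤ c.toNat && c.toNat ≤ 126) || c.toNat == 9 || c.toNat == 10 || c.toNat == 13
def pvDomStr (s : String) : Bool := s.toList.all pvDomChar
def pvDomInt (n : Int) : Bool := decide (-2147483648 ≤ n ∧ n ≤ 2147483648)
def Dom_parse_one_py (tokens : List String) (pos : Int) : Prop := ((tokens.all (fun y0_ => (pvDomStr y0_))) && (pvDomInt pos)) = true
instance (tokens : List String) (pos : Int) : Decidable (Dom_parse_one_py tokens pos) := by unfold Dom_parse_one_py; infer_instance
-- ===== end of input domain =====

-- B replaces A's recursive descent by one iterative pass with a needed-operand counter; same return value wherever A returns.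

-- shared module constants (the frozensets of the Python module), as Bool predicates
def isSignTok (t : String) : Bool := t == "+" || t == "-"
def isDigitTok (t : String) : Bool :=
  t == "0" || t == "1" || t == "2" || t == "3" || t == "4" ||
  t == "5" || t == "6" || t == "7" || t == "8" || t == "9"
def isLeafTok (t : String) : Bool :=
  t == "x" || t == "a" || t == "pi" || t == "E" || t == "oo" || t == "-oo"
def isBinaryTok (t : String) : Bool :=
  t == "+" || t == "-" || t == "*" || t == "/" || t == "**"
def isUnaryTok (t : String) : Bool :=
  t == "sin" || t == "cos" || t == "tan" || t == "exp" || t == "log" || t == "sqrt" ||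
  t == "asin" || t == "acos" || t == "atan" || t == "sinh" || t == "cosh" || t == "tanh" ||
  t == "asinh" || t == "acosh" || t == "atanh"

-- the digit-skipping while loop both Pythons contain verbatim:
-- `while pos < len(tokens) and tokens[pos] in _DIGITS: pos += 1`
theorem pvDecStep {L p : Int} (h : p < L) : (L - (p + 1)).toNat < (L - p).toNat :=
  (Int.toNat_lt_toNat (Int.sub_pos.mpr h)).mpr (sub_lt_sub_left (lt_add_one p) L)

theorem pvDecStep' {L p : Int} (h : ¬ p ≥ L) : (L - (p + 1)).toNat < (L - p).toNat :=
  pvDecStep (not_le.mp h)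

theorem pvDecSkip {L p q : Int} (h1 : ¬ p ≥ L) (h2 : p + 2 ≤ q) : (L - q).toNat < (L - p).toNat :=
  (Int.toNat_lt_toNat (Int.sub_pos.mpr (not_le.mp h1))).mpr
    (sub_lt_sub_left (lt_of_lt_of_le (lt_add_of_pos_right p two_pos) h2) L)

def skipDigits (tokens : List String) (pos : Int) : Int :=
  if h : pos < (tokens.length : Int) ∧ (PySem.List.pyGet? tokens pos).any isDigitTok then
    skipDigits tokens (pos + 1)
  else pos
termination_by ((tokens.length : Int) - pos).toNat
decreasing_by exact pvDecStep h.1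

theorem skipDigits_ge (tokens : List String) (pos : Int) : pos ≤ skipDigits tokens pos := by
  fun_induction skipDigits tokens pos with
  | case1 pos h ih => omega
  | case2 pos h => omega

-- ===== PORT A =====
-- A raises ValueError/IndexError on malformed input: modelled by `none`; fuel is an upper
-- bound on the recursion depth (proved sufficient below), the recursion itself is A's.
def parseAF (tokens : List String) : Nat → Int → Option Int
  | 0, _ => none
  | f + 1, pos =>
    if pos ≥ (tokens.length : Int) then none          -- raise: Unexpected end of token stream
    else
      match PySem.List.pyGet? tokens pos with
      | none => none                                   -- tokens[pos] raises IndexError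
      | some tok =>
        if isSignTok tok && decide (pos + 1 < (tokens.length : Int)) &&
           (PySem.List.pyGet? tokens (pos + 1)).any isDigitTok then
          some (skipDigits tokens (pos + 2))
        else if isLeafTok tok then some (pos + 1)
        else if isBinaryTok tok then
          match parseAF tokens f (pos + 1) with        -- left operand
          | none => none
          | some p1 => parseAF tokens f p1             -- right operand
        else if isUnaryTok tok then parseAF tokens f (pos + 1)
        else none                                      -- raise: Unexpected token

def parse_one_py (tokens : List String) (pos : Int) : Int :=
  (parseAF tokens (((tokens.length : Int) - pos).toNat + 1) pos).getD 0

-- ===== PORT B =====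
-- iterative single pass: `needed` = number of prefix expressions still owed
def loopB (tokens : List String) (pos : Int) (needed : Nat) : Option Int :=
  match needed with
  | 0 => some pos
  | k + 1 =>
    if _h : pos ≥ (tokens.length : Int) then none      -- raise: Unexpected end of token stream
    else
      match PySem.List.pyGet? tokens pos with
      | none => none                                   -- tokens[pos] raises IndexError
      | some tok =>
        if isSignTok tok && decide (pos + 1 < (tokens.length : Int)) &&
           (PySem.List.pyGet? tokens (pos + 1)).any isDigitTok then
          loopB tokens (skipDigits tokens (pos + 2)) k
        else if isLeafTok tok then loopB tokens (pos + 1) k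
        else if isBinaryTok tok then loopB tokens (pos + 1) (k + 2)
        else if isUnaryTok tok then loopB tokens (pos + 1) (k + 1)
        else none                                      -- raise: Unexpected token
termination_by ((tokens.length : Int) - pos).toNat
decreasing_by
  · exact pvDecSkip _h (skipDigits_ge tokens (pos + 2))
  · exact pvDecStep' _h
  · exact pvDecStep' _h
  · exact pvDecStep' _h

def parse_one_py_alt (tokens : List String) (pos : Int) : Int :=
  (loopB tokens pos 1).getD 0

-- ===== PRECONDITION & SPEC =====
-- the token stream as A actually reads it: raw index p accesses (tokens ++ tokens)[p + len]
-- (Python's negative-index wraparound), valid for every p ≥ -len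
def streamFrom (tokens : List String) (pos : Int) : List String :=
  (tokens ++ tokens).drop (pos + tokens.length).toNat

-- grammar check (structural single pass): `chk s skip n` = the stream s — after first
-- discarding leading digit tokens if skip (the tail of a number being read) — starts with
-- n well-formed prefix expressions
def chk : List String → Bool → Nat → Bool
  | _, _, 0 => true
  | [], _, _ + 1 => false
  | t :: rest, skip, n + 1 =>
    if skip && isDigitTok t then chk rest true (n + 1)
    else if isSignTok t && rest.head?.any isDigitTok then chk rest true n
    else if isLeafTok t then chk rest false n
    else if isBinaryTok t then chk rest false (n + 2)
    else if isUnaryTok t then chk rest false (n + 1)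
    else false

-- Pre_ = exactly the inputs on which the Python A returns normally (elsewhere it raises
-- ValueError or, for pos < -len(tokens), IndexError)
def Pre_parse_one_py (tokens : List String) (pos : Int) : Prop :=
  -(tokens.length : Int) ≤ pos ∧ chk (streamFrom tokens pos) false 1 = true
instance (tokens : List String) (pos : Int) : Decidable (Pre_parse_one_py tokens pos) := by
  unfold Pre_parse_one_py; infer_instance

def pvWitness_parse_one_py : List String × Int := (["*", "+", "1", "7", "x"], 0)

def Spec_parse_one_py (tokens : List String) (pos : Int) (out : Int) : Prop := out = parse_one_py_alt tokens pos
instance (tokens : List String) (pos : Int) (out : Int) : Decidable (Spec_parse_one_py tokens pos out) := by unfold Spec_parse_one_py; infer_instance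

-- ===== CLAIM (what is proved, stated in full; the proofs are below) =====
def Claim_equal_parse_one_py : Prop := ∀ (tokens : List String) (pos : Int), Dom_parse_one_py tokens pos → Pre_parse_one_py tokens pos → Spec_parse_one_py tokens pos (parse_one_py tokens pos)

-- ===== LEMMAS AND PROOFS =====

theorem parseAF_mono (tokens : List String) :
    ∀ f f' pos q, f ≤ f' → parseAF tokens f pos = some q → parseAF tokens f' pos = some q := by
  intro f
  induction f with
  | zero => intro f' pos q _ h; simp [parseAF] at h
  | succ f ih =>
    intro f' pos q hle h
    obtain ⟨f'', rfl⟩ : ∃ f'', f' = f'' + 1 := ⟨f' - 1, by omega⟩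
    simp only [parseAF] at h ⊢
    by_cases h0 : pos ≥ (tokens.length : Int)
    · simp [h0] at h
    · rw [if_neg h0] at h ⊢
      cases hpg : PySem.List.pyGet? tokens pos with
      | none => simp [hpg] at h
      | some tok =>
        simp only [hpg] at h ⊢
        by_cases g1 : (isSignTok tok && decide (pos + 1 < (tokens.length : Int)) &&
            (PySem.List.pyGet? tokens (pos + 1)).any isDigitTok) = true
        · rw [if_pos g1] at h ⊢; exact h
        · rw [if_neg g1] at h ⊢
          by_cases g2 : isLeafTok tok = true
          · rw [if_pos g2] at h ⊢; exact h
          · rw [if_neg g2] at h ⊢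
            by_cases g3 : isBinaryTok tok = true
            · rw [if_pos g3] at h ⊢
              cases hL : parseAF tokens f (pos + 1) with
              | none => rw [hL] at h; simp at h
              | some p1 =>
                rw [hL] at h
                rw [ih f'' (pos + 1) p1 (by omega) hL]
                exact ih f'' p1 q (by omega) h
            · rw [if_neg g3] at h ⊢
              by_cases g4 : isUnaryTok tok = true
              · rw [if_pos g4] at h ⊢; exact ih f'' (pos + 1) q (by omega) h
              · rw [if_neg g4] at h; simp at h

theorem parseAF_lb (tokens : List String) :
    ∀ f pos q, parseAF tokens f pos = some q → pos + 1 ≤ q := by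
  intro f
  induction f with
  | zero => intro pos q h; simp [parseAF] at h
  | succ f ih =>
    intro pos q h
    simp only [parseAF] at h
    by_cases h0 : pos ≥ (tokens.length : Int)
    · simp [h0] at h
    · rw [if_neg h0] at h
      cases hpg : PySem.List.pyGet? tokens pos with
      | none => simp [hpg] at h
      | some tok =>
        simp only [hpg] at h
        by_cases g1 : (isSignTok tok && decide (pos + 1 < (tokens.length : Int)) &&
            (PySem.List.pyGet? tokens (pos + 1)).any isDigitTok) = true
        · rw [if_pos g1] at h
          have := skipDigits_ge tokens (pos + 2)
          simp only [Option.some.injEq] at h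
          omega
        · rw [if_neg g1] at h
          by_cases g2 : isLeafTok tok = true
          · rw [if_pos g2] at h; simp only [Option.some.injEq] at h; omega
          · rw [if_neg g2] at h
            by_cases g3 : isBinaryTok tok = true
            · rw [if_pos g3] at h
              cases hL : parseAF tokens f (pos + 1) with
              | none => rw [hL] at h; simp at h
              | some p1 =>
                rw [hL] at h
                have h1 := ih (pos + 1) p1 hL
                have h2 := ih p1 q h
                omega
            · rw [if_neg g3] at h
              by_cases g4 : isUnaryTok tok = true
              · rw [if_pos g4] at h
                have := ih (pos + 1) q h
                omega
              · rw [if_neg g4] at h; simp at h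

theorem parseAF_fuelTop (tokens : List String) :
    ∀ f pos q, parseAF tokens f pos = some q →
      parseAF tokens (((tokens.length : Int) - pos).toNat + 1) pos = some q := by
  intro f
  induction f with
  | zero => intro pos q h; simp [parseAF] at h
  | succ f ih =>
    intro pos q h
    simp only [parseAF] at h ⊢
    by_cases h0 : pos ≥ (tokens.length : Int)
    · simp [h0] at h
    · rw [if_neg h0] at h ⊢
      cases hpg : PySem.List.pyGet? tokens pos with
      | none => simp [hpg] at h
      | some tok =>
        simp only [hpg] at h ⊢
        by_cases g1 : (isSignTok tok && decide (pos + 1 < (tokens.length : Int)) &&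
            (PySem.List.pyGet? tokens (pos + 1)).any isDigitTok) = true
        · rw [if_pos g1] at h ⊢; exact h
        · rw [if_neg g1] at h ⊢
          by_cases g2 : isLeafTok tok = true
          · rw [if_pos g2] at h ⊢; exact h
          · rw [if_neg g2] at h ⊢
            by_cases g3 : isBinaryTok tok = true
            · rw [if_pos g3] at h ⊢
              cases hL : parseAF tokens f (pos + 1) with
              | none => rw [hL] at h; simp at h
              | some p1 =>
                rw [hL] at h
                have hlb1 := parseAF_lb tokens f (pos + 1) p1 hL
                have hlb2 := parseAF_lb tokens f p1 q h
                have hL' := parseAF_mono tokens _ (((tokens.length : Int) - pos).toNat) (pos + 1) p1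
                  (by omega) (ih (pos + 1) p1 hL)
                have hR' := parseAF_mono tokens _ (((tokens.length : Int) - pos).toNat) p1 q
                  (by omega) (ih p1 q h)
                rw [hL']
                exact hR'
            · rw [if_neg g3] at h ⊢
              by_cases g4 : isUnaryTok tok = true
              · rw [if_pos g4] at h ⊢
                exact parseAF_mono tokens _ (((tokens.length : Int) - pos).toNat) (pos + 1) q
                  (by omega) (ih (pos + 1) q h)
              · rw [if_neg g4] at h; simp at h

theorem simB (tokens : List String) :
    ∀ f pos q, parseAF tokens f pos = some q → ∀ k, loopB tokens pos (k + 1) = loopB tokens q k := by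
  intro f
  induction f with
  | zero => intro pos q h; simp [parseAF] at h
  | succ f ih =>
    intro pos q h k
    simp only [parseAF] at h
    rw [loopB]
    by_cases h0 : pos ≥ (tokens.length : Int)
    · simp [h0] at h
    · rw [if_neg h0] at h
      rw [dif_neg h0]
      cases hpg : PySem.List.pyGet? tokens pos with
      | none => simp [hpg] at h
      | some tok =>
        simp only [hpg] at h ⊢
        by_cases g1 : (isSignTok tok && decide (pos + 1 < (tokens.length : Int)) &&
            (PySem.List.pyGet? tokens (pos + 1)).any isDigitTok) = true
        · rw [if_pos g1] at h
          rw [if_pos g1]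
          simp only [Option.some.injEq] at h
          rw [h]
        · rw [if_neg g1] at h
          rw [if_neg g1]
          by_cases g2 : isLeafTok tok = true
          · rw [if_pos g2] at h
            rw [if_pos g2]
            simp only [Option.some.injEq] at h
            rw [h]
          · rw [if_neg g2] at h
            rw [if_neg g2]
            by_cases g3 : isBinaryTok tok = true
            · rw [if_pos g3] at h
              rw [if_pos g3]
              cases hL : parseAF tokens f (pos + 1) with
              | none => rw [hL] at h; simp at h
              | some p1 =>
                rw [hL] at h
                rw [ih (pos + 1) p1 hL (k + 1)]
                exact ih p1 q h k
            · rw [if_neg g3] at h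
              rw [if_neg g3]
              by_cases g4 : isUnaryTok tok = true
              · rw [if_pos g4] at h
                rw [if_pos g4]
                exact ih (pos + 1) q h k
              · rw [if_neg g4] at h; simp at h

theorem streamFrom_eq_nil (tokens : List String) (pos : Int) (h : (tokens.length : Int) ≤ pos) :
    streamFrom tokens pos = [] := by
  apply List.drop_eq_nil_of_le; simp; omega

theorem streamFrom_head (tokens : List String) (pos : Int)
    (h1 : -(tokens.length : Int) ≤ pos) (h2 : pos < (tokens.length : Int)) :
    (streamFrom tokens pos).head? = PySem.List.pyGet? tokens pos := by
  unfold streamFrom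
  rw [List.head?_drop]
  rcases le_or_gt 0 pos with hp | hp
  · rw [PySem.List.pyGet?_of_nonneg tokens hp]
    rw [List.getElem?_append_right (by omega)]
    congr 1; omega
  · have hk : PySem.List.pyGet? tokens (-(((-pos).toNat : Nat) : Int)) = tokens[tokens.length - (-pos).toNat]? :=
      PySem.List.pyGet?_neg_natCast tokens _ (by omega) (by omega)
    rw [show pos = -(((-pos).toNat : Nat) : Int) by omega, hk]
    rw [List.getElem?_append_left (by omega)]
    congr 1; omega

theorem streamFrom_tail (tokens : List String) (pos : Int) (h1 : -(tokens.length : Int) ≤ pos) :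
    streamFrom tokens (pos + 1) = (streamFrom tokens pos).tail := by
  unfold streamFrom
  rw [List.tail_drop]; congr 1; omega

theorem streamFrom_eq_cons (tokens : List String) (pos : Int) (t : String)
    (h1 : -(tokens.length : Int) ≤ pos)
    (ht : PySem.List.pyGet? tokens pos = some t) :
    streamFrom tokens pos = t :: streamFrom tokens (pos + 1) := by
  have h2 : pos < (tokens.length : Int) := by
    by_contra hc
    have hn : PySem.List.pyGet? tokens pos = none := by
      rw [PySem.List.pyGet?_eq_none_iff]; simp [PySem.Raise.InRange]; omega
    simp [hn] at ht
  have hh := streamFrom_head tokens pos h1 h2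
  have htl := streamFrom_tail tokens pos h1
  cases hs : streamFrom tokens pos with
  | nil => rw [hs] at hh; simp [ht] at hh
  | cons a l =>
    rw [hs] at hh htl
    simp [ht] at hh
    simp [htl, hh]

theorem pyGet_some (tokens : List String) (pos : Int)
    (h1 : -(tokens.length : Int) ≤ pos) (h2 : pos < (tokens.length : Int)) :
    ∃ t, PySem.List.pyGet? tokens pos = some t := by
  cases hpg : PySem.List.pyGet? tokens pos with
  | some t => exact ⟨t, rfl⟩
  | none =>
    rw [PySem.List.pyGet?_eq_none_iff] at hpg
    exact absurd (by simp [PySem.Raise.InRange]; omega) hpg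

theorem skipDigits_stream (tokens : List String) :
    ∀ m pos, ((tokens.length : Int) - pos).toNat ≤ m → -(tokens.length : Int) ≤ pos →
      streamFrom tokens (skipDigits tokens pos) = (streamFrom tokens pos).dropWhile isDigitTok := by
  intro m
  induction m with
  | zero =>
    intro pos hm hge
    rw [skipDigits, dif_neg (by rintro ⟨h, -⟩; omega)]
    rw [streamFrom_eq_nil tokens pos (by omega)]
    simp
  | succ m ih =>
    intro pos hm hge
    rw [skipDigits]
    by_cases hc : pos < (tokens.length : Int) ∧ (PySem.List.pyGet? tokens pos).any isDigitTok
    · rw [dif_pos hc]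
      obtain ⟨hlt, hdig⟩ := hc
      cases hpg : PySem.List.pyGet? tokens pos with
      | none => simp [hpg] at hdig
      | some t =>
        rw [hpg] at hdig; simp at hdig
        rw [ih (pos + 1) (by omega) (by omega)]
        rw [streamFrom_eq_cons tokens pos t hge hpg]
        simp [hdig]
    · rw [dif_neg hc]
      by_cases hlt : pos < (tokens.length : Int)
      · obtain ⟨t, hpg⟩ := pyGet_some tokens pos hge hlt
        have hdig : isDigitTok t = false := by
          by_contra hd
          exact hc ⟨hlt, by simp [hpg]; simpa using hd⟩
        rw [streamFrom_eq_cons tokens pos t hge hpg]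
        simp [hdig]
      · rw [streamFrom_eq_nil tokens pos (by omega)]
        simp

theorem guard_eq (tokens : List String) (pos : Int) (h1 : -(tokens.length : Int) ≤ pos) :
    (streamFrom tokens (pos + 1)).head?.any isDigitTok
      = (decide (pos + 1 < (tokens.length : Int)) && (PySem.List.pyGet? tokens (pos + 1)).any isDigitTok) := by
  by_cases hlt : pos + 1 < (tokens.length : Int)
  · rw [streamFrom_head tokens (pos + 1) (by omega) hlt]
    simp [hlt]
  · rw [streamFrom_eq_nil tokens (pos + 1) (by omega)]
    simp [hlt]

theorem chk_skip :
    ∀ (s : List String) (n : Nat), chk s true n = chk (s.dropWhile isDigitTok) false n := by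
  intro s
  induction s with
  | nil => intro n; cases n <;> simp [chk]
  | cons t rest ih =>
    intro n
    by_cases hd : isDigitTok t = true
    · rw [List.dropWhile_cons, if_pos hd]
      cases n with
      | zero => rw [chk]; cases hr : rest.dropWhile isDigitTok <;> simp [chk]
      | succ n =>
        calc chk (t :: rest) true (n + 1) = chk rest true (n + 1) := by
              rw [chk]; simp [hd]
          _ = chk (rest.dropWhile isDigitTok) false (n + 1) := ih (n + 1)
    · rw [List.dropWhile_cons, if_neg hd]
      cases n with
      | zero => simp [chk]
      | succ n => rw [chk, chk]; simp [hd]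

theorem chk_parse (tokens : List String) :
    ∀ m pos n, ((tokens.length : Int) - pos).toNat ≤ m → -(tokens.length : Int) ≤ pos →
      chk (streamFrom tokens pos) false (n + 1) = true →
      ∃ f q, parseAF tokens f pos = some q ∧ -(tokens.length : Int) ≤ q ∧
        chk (streamFrom tokens q) false n = true := by
  intro m
  induction m with
  | zero =>
    intro pos n hm hge hchk
    rw [streamFrom_eq_nil tokens pos (by omega)] at hchk
    simp [chk] at hchk
  | succ m ih =>
    intro pos n hm hge hchk
    by_cases hlen : pos < (tokens.length : Int)
    case neg =>
      rw [streamFrom_eq_nil tokens pos (by omega)] at hchk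
      simp [chk] at hchk
    obtain ⟨t, hpg⟩ := pyGet_some tokens pos hge hlen
    rw [streamFrom_eq_cons tokens pos t hge hpg] at hchk
    rw [chk] at hchk
    rw [if_neg (by simp : ¬ (false && isDigitTok t) = true)] at hchk
    rw [guard_eq tokens pos hge] at hchk
    have hgg : (isSignTok t && (decide (pos + 1 < (tokens.length : Int)) &&
        (PySem.List.pyGet? tokens (pos + 1)).any isDigitTok))
        = (isSignTok t && decide (pos + 1 < (tokens.length : Int)) &&
        (PySem.List.pyGet? tokens (pos + 1)).any isDigitTok) := (Bool.and_assoc _ _ _).symm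
    rw [hgg] at hchk
    by_cases g1 : (isSignTok t && decide (pos + 1 < (tokens.length : Int)) &&
        (PySem.List.pyGet? tokens (pos + 1)).any isDigitTok) = true
    · rw [if_pos g1] at hchk
      have g1' := g1
      simp only [Bool.and_eq_true, decide_eq_true_eq] at g1'
      obtain ⟨⟨-, hlt1⟩, hdany⟩ := g1'
      cases hpg1 : PySem.List.pyGet? tokens (pos + 1) with
      | none => rw [hpg1] at hdany; simp at hdany
      | some d =>
        rw [hpg1] at hdany; simp at hdany
        have hcons1 : streamFrom tokens (pos + 1) = d :: streamFrom tokens (pos + 2) := by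
          rw [show pos + 2 = pos + 1 + 1 by ring]
          exact streamFrom_eq_cons tokens (pos + 1) d (by omega) hpg1
        rw [chk_skip, hcons1, List.dropWhile_cons, if_pos hdany] at hchk
        have hss : streamFrom tokens (skipDigits tokens (pos + 2))
            = (streamFrom tokens (pos + 2)).dropWhile isDigitTok :=
          skipDigits_stream tokens (((tokens.length : Int) - (pos + 2)).toNat) (pos + 2) le_rfl (by omega)
        refine ⟨1, skipDigits tokens (pos + 2), ?_, ?_, ?_⟩
        · simp only [parseAF]
          rw [if_neg (by omega : ¬ pos ≥ (tokens.length : Int))]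
          simp only [hpg]
          rw [if_pos g1]
        · have := skipDigits_ge tokens (pos + 2); omega
        · rw [hss]; exact hchk
    · rw [if_neg g1] at hchk
      by_cases g2 : isLeafTok t = true
      · rw [if_pos g2] at hchk
        refine ⟨1, pos + 1, ?_, by omega, hchk⟩
        simp only [parseAF]
        rw [if_neg (by omega : ¬ pos ≥ (tokens.length : Int))]
        simp only [hpg]
        rw [if_neg g1, if_pos g2]
      · rw [if_neg g2] at hchk
        by_cases g3 : isBinaryTok t = true
        · rw [if_pos g3] at hchk
          obtain ⟨f1, q1, hA1, hq1, hc1⟩ := ih (pos + 1) (n + 1) (by omega) (by omega) hchk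
          have hlb1 := parseAF_lb tokens f1 (pos + 1) q1 hA1
          obtain ⟨f2, q2, hA2, hq2, hc2⟩ := ih q1 n (by omega) hq1 hc1
          refine ⟨f1 + f2 + 1, q2, ?_, hq2, hc2⟩
          simp only [parseAF]
          rw [if_neg (by omega : ¬ pos ≥ (tokens.length : Int))]
          simp only [hpg]
          rw [if_neg g1, if_neg g2, if_pos g3]
          rw [parseAF_mono tokens f1 (f1 + f2) (pos + 1) q1 (by omega) hA1]
          exact parseAF_mono tokens f2 (f1 + f2) q1 q2 (by omega) hA2
        · rw [if_neg g3] at hchk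
          by_cases g4 : isUnaryTok t = true
          · rw [if_pos g4] at hchk
            obtain ⟨f1, q1, hA1, hq1, hc1⟩ := ih (pos + 1) n (by omega) (by omega) hchk
            refine ⟨f1 + 1, q1, ?_, hq1, hc1⟩
            simp only [parseAF]
            rw [if_neg (by omega : ¬ pos ≥ (tokens.length : Int))]
            simp only [hpg]
            rw [if_neg g1, if_neg g2, if_neg g3, if_pos g4]
            exact hA1
          · rw [if_neg g4] at hchk; simp at hchk

-- ===== VERDICT (by name: the statement is the Claim_ definition above) =====
theorem parse_one_py_spec : Claim_equal_parse_one_py := by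
  intro tokens pos _dom hpre
  obtain ⟨hge, hchk⟩ := hpre
  obtain ⟨f, q, hA, -, -⟩ :=
    chk_parse tokens (((tokens.length : Int) - pos).toNat) pos 0 (le_refl _) hge hchk
  have hTop := parseAF_fuelTop tokens f pos q hA
  have h0 : loopB tokens q 0 = some q := by rw [loopB]
  have hB : loopB tokens pos 1 = some q := (simB tokens f pos q hA 0).trans h0
  show parse_one_py tokens pos = parse_one_py_alt tokens pos
  simp [parse_one_py, parse_one_py_alt, hTop, hB]
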